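-- pv_equiv track=rewrite | github.com/SWeszler/google-kickstart | 2020_G/G1/g1.py | solution
-- ===== SOURCE A (Python) =====
-- def solution(s):
--     i = 0
--     count_k = 0
--     count_s = 0
--     count = 0
--     for i in range(len(s)):
--         if s[i:i+4] == 'KICK':
--             count_k += 1
--         if s[i:i+5] == 'START':
--             count_s += 1
--
--         if count_s:
--             count += count_k * count_s
--             count_s = 0
--
--     return count
-- ===== SOURCE B (Python) =====
-- def solution(s):
--     n = len(s)
--     # pass 1: pref[j] = number of indices k < j with s[k:k+4] == 'KICK'
--     pref = [0]
--     for i in range(n):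
--         pref.append(pref[-1] + (1 if s[i:i+4] == 'KICK' else 0))
--     # pass 2: for every START position j, add the KICKs strictly before it
--     total = 0
--     for j in range(n):
--         if s[j:j+5] == 'START':
--             total += pref[j]
--     return total
-- ===== Notes on version B (the rewrite author's own statement) =====
-- stated objective: alternative
-- what changed: Replaces A's single fused loop carrying three mutable counters (with the count_s reset trick) by two separate passes: first an explicit prefix table pref[j] = number of KICKs starting before j, then a pass that adds pref[j] at every START position j.
import Mathlib
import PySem

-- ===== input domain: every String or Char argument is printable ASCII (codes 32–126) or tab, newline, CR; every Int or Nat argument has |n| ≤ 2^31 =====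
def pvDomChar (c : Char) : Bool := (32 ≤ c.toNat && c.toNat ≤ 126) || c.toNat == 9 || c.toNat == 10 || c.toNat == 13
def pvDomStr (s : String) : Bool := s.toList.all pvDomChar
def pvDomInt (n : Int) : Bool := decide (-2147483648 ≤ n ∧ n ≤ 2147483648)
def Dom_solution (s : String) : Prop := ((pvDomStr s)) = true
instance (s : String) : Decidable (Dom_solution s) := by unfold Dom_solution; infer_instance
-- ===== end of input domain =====

-- B replaces A's fused three-counter loop by a prefix-count table plus a pass over START positions; same O(n) cost, different decomposition.

-- shared slice tests: s[i:i+4] == 'KICK' and s[i:i+5] == 'START' (exact via PySem slicing)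
def kickAt (cs : List Char) (i : Int) : Bool :=
  PySem.List.slice cs (some i) (some (i + 4)) == ['K', 'I', 'C', 'K']
def startAt (cs : List Char) (i : Int) : Bool :=
  PySem.List.slice cs (some i) (some (i + 5)) == ['S', 'T', 'A', 'R', 'T']

-- ===== PORT A =====
-- loop body of A: state (count_k, count_s, count)
def stepA (cs : List Char) (st : Int × Int × Int) (i : Int) : Int × Int × Int :=
  let count_k := if kickAt cs i then st.1 + 1 else st.1
  let count_s := if startAt cs i then st.2.1 + 1 else st.2.1
  if count_s ≠ 0 then (count_k, 0, st.2.2 + count_k * count_s)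
  else (count_k, count_s, st.2.2)

def solution (s : String) : Int :=
  let cs := s.toList
  ((PySem.List.pyRange 0 (PySem.List.len cs) 1).foldl (stepA cs) (0, 0, 0)).2.2

-- ===== PORT B =====
-- pass 1 body: pref.append(pref[-1] + (1 if KICK at i else 0))
def stepBPref (cs : List Char) (p : List Int) (i : Int) : List Int :=
  p ++ [PySem.List.pyGetD p (-1) 0 + (if kickAt cs i then 1 else 0)]
-- pass 2 body: if START at j: total += pref[j]
def stepBTot (cs : List Char) (pref : List Int) (total : Int) (j : Int) : Int :=
  if startAt cs j then total + PySem.List.pyGetD pref j 0 else total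

def solution_alt (s : String) : Int :=
  let cs := s.toList
  let pref := (PySem.List.pyRange 0 (PySem.List.len cs) 1).foldl (stepBPref cs) [0]
  (PySem.List.pyRange 0 (PySem.List.len cs) 1).foldl (stepBTot cs pref) 0

-- ===== PRECONDITION & SPEC =====
def Spec_solution (s : String) (out : Int) : Prop := out = solution_alt s
instance (s : String) (out : Int) : Decidable (Spec_solution s out) := by unfold Spec_solution; infer_instance

-- ===== CLAIM (what is proved, stated in full; the proofs are below) =====
def Claim_equal_solution : Prop := ∀ (s : String), Dom_solution s → Spec_solution s (solution s)

-- ===== LEMMAS AND PROOFS =====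

-- number of KICK starts among indices < n, and A's running total after n steps
def Kcnt (cs : List Char) (n : Nat) : Int := ((List.range n).countP (fun i => kickAt cs i) : Nat)
def Ccnt (cs : List Char) (n : Nat) : Int :=
  ((List.range n).map (fun (j : Nat) => if startAt cs (j : Int) then Kcnt cs j else 0)).sum

lemma kick_start_exclusive (cs : List Char) (i : Nat) :
    ¬(kickAt cs (i : Int) = true ∧ startAt cs (i : Int) = true) := by
  rintro ⟨hk, hs⟩
  simp only [kickAt, startAt, beq_iff_eq] at hk hs
  rw [show ((i : Int) + 4) = ((i : Int) + ((4 : Nat) : Int)) by norm_num,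
      PySem.List.slice_natCast_add] at hk
  rw [show ((i : Int) + 5) = ((i : Int) + ((5 : Nat) : Int)) by norm_num,
      PySem.List.slice_natCast_add] at hs
  rcases h : cs.drop i with _ | ⟨c, t⟩ <;> rw [h] at hk hs <;> simp_all

lemma Kcnt_succ (cs : List Char) (n : Nat) :
    Kcnt cs (n + 1) = Kcnt cs n + (if kickAt cs (n : Int) then 1 else 0) := by
  simp only [Kcnt, List.range_succ]
  split <;> simp_all

lemma Ccnt_succ (cs : List Char) (n : Nat) :
    Ccnt cs (n + 1) = Ccnt cs n + (if startAt cs (n : Int) then Kcnt cs n else 0) := by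
  simp [Ccnt, List.range_succ]

lemma A_inv (cs : List Char) (n : Nat) :
    (List.range n).foldl (fun st (i : Nat) => stepA cs st (i : Int)) (0, 0, 0)
      = (Kcnt cs n, 0, Ccnt cs n) := by
  induction n with
  | zero => simp [Kcnt, Ccnt]
  | succ n ih =>
    rw [List.range_succ, List.foldl_append, ih]
    simp only [List.foldl_cons, List.foldl_nil, stepA]
    by_cases hs : startAt cs (n : Int) = true
    · have hk : kickAt cs (n : Int) = false := by
        by_contra h
        exact kick_start_exclusive cs n ⟨by simpa using h, hs⟩
      simp [hs, hk, Kcnt_succ, Ccnt_succ]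
    · simp only [Bool.not_eq_true] at hs
      simp [hs, Kcnt_succ, Ccnt_succ]
      split <;> ring

lemma B_pref (cs : List Char) (n : Nat) :
    (List.range n).foldl (fun p (i : Nat) => stepBPref cs p (i : Int)) [0]
      = (List.range (n + 1)).map (fun j => Kcnt cs j) := by
  induction n with
  | zero => simp [Kcnt]
  | succ n ih =>
    rw [List.range_succ, List.foldl_append, ih]
    simp only [List.foldl_cons, List.foldl_nil, stepBPref]
    rw [List.range_succ (n := n + 1), List.map_append,
        show (List.range (n + 1)).map (fun j => Kcnt cs j)
            = (List.range n).map (fun j => Kcnt cs j) ++ [Kcnt cs n] by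
          rw [List.range_succ, List.map_append]; simp,
        PySem.List.pyGetD_neg_one_append_singleton]
    simp [Kcnt_succ]

lemma B_tot (cs : List Char) (pref : List Int) (n : Nat)
    (hp : ∀ j, j < n → PySem.List.pyGetD pref (j : Int) 0 = Kcnt cs j) :
    (List.range n).foldl (fun t (j : Nat) => stepBTot cs pref t (j : Int)) 0 = Ccnt cs n := by
  induction n with
  | zero => simp [Ccnt]
  | succ n ih =>
    rw [List.range_succ, List.foldl_append,
        ih (fun j hj => hp j (Nat.lt_succ_of_lt hj))]
    simp only [List.foldl_cons, List.foldl_nil, stepBTot, Ccnt_succ,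
      hp n (Nat.lt_succ_self n)]
    split <;> simp

theorem solution_eq_alt (s : String) : solution s = solution_alt s := by
  unfold solution solution_alt
  simp only [PySem.List.len_eq, PySem.List.pyRange_zero_natCast, List.foldl_map]
  rw [A_inv, B_pref, B_tot s.toList _ s.toList.length]
  intro j hj
  rw [PySem.List.pyGetD_natCast,
      PySem.List.getD_map_range _ _ _ _ (Nat.lt_succ_of_lt hj)]

-- ===== VERDICT (by name: the statement is the Claim_ definition above) =====
theorem solution_spec : Claim_equal_solution := by
  intro s _
  exact solution_eq_alt s
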